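-- pv_equiv track=rewrite | github.com/dsg813/AAI-CPE-EE-551-Final | csvVisionTest.py | count_contiguous_items
-- ===== SOURCE A (Python) =====
-- def count_contiguous_items(board):
--     """
--     Counts how many items are contiguous in each cluster.
--     Updates each cell's last 2 indices with the count.
--     """
--     # Create a set of all unique cluster codes (first, third, and fourth characters)
--     unique_clusters = set(cell[0] + cell[2:4] for row in board for cell in row if cell[:4] != "0000")
--
--     # Count occurrences of each cluster
--     cluster_counts = {cluster: 0 for cluster in unique_clusters}
--     for row in board:
--         for cell in row:
--             cluster_code = cell[0] + cell[2:4]  # Extract the relevant cluster code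
--             if cluster_code in cluster_counts:
--                 cluster_counts[cluster_code] += 1
--
--     # Update each cell with the cluster count
--     for y in range(len(board)):
--         for x in range(len(board[0])):
--             cell = board[y][x]
--             cluster_code = cell[0] + cell[2:4]
--             if cluster_code in cluster_counts:
--                 count = cluster_counts[cluster_code]
--                 board[y][x] = cell[:5] + f"{count:02}"  # Update last 2 indices with the count
--     return board
-- ===== SOURCE B (Python) =====
-- def count_contiguous_items(board):
--     """
--     Counts how many items are contiguous in each cluster.
--     Updates each cell's last 2 indices with the count.
--     """
--     # Sort-then-group instead of hash counting: sort all (code, validity) pairs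
--     # by code so equal codes are adjacent, then build the table in one
--     # run-length scan over the sorted list (a key enters the table only if its
--     # run contains a non-"0000" cell).
--     pairs = sorted(((cell[0] + cell[2:4], cell[:4] != "0000")
--                     for row in board for cell in row), key=lambda p: p[0])
--     table = {}
--     cur = None  # (code, run_length, run_has_valid_cell)
--     for code, ok in pairs:
--         if cur is not None and cur[0] == code:
--             cur = (code, cur[1] + 1, cur[2] or ok)
--         else:
--             if cur is not None and cur[2]:
--                 table[cur[0]] = cur[1]
--             cur = (code, 1, ok)
--     if cur is not None and cur[2]:
--         table[cur[0]] = cur[1]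
--
--     # Write the run lengths back in place.
--     for y in range(len(board)):
--         for x in range(len(board[0])):
--             cell = board[y][x]
--             code = cell[0] + cell[2:4]
--             if code in table:
--                 board[y][x] = cell[:5] + f"{table[code]:02}"
--     return board
-- ===== Notes on version B (the rewrite author's own statement) =====
-- stated objective: alternative
-- what changed: Replaces A's hash-table counting (valid-code set comprehension, zero-initialised dict, membership-guarded increment pass) with sort-then-group: all (code, validity) pairs are sorted by code and the count table is built by a single run-length scan over the sorted list; the in-place write-back stays index-based.
import Mathlib
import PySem

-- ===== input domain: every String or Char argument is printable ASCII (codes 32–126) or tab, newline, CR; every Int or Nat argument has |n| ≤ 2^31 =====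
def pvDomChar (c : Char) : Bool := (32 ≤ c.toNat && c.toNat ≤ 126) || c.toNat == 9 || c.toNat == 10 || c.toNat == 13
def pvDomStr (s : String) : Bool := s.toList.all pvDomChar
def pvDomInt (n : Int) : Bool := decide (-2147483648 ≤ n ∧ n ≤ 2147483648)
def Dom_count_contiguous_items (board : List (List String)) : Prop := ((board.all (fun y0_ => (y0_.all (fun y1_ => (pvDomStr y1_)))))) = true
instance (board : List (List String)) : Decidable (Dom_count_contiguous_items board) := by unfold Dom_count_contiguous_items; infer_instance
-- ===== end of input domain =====

-- B replaces A's hash-table counting with sort-then-group: sort all (code, validity) pairs by code,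
-- build the count table in one run-length scan over the sorted list; same in-place write-back; return value proved equal.

-- ===== PORT A =====
-- cluster code: cell[0] + cell[2:4]  (cell[0] raises IndexError on "" — excluded by Pre_)
def pvCodeL (cs : List Char) : List Char :=
  ((PySem.List.pyGet? cs 0).map (fun c => [c])).getD [] ++ PySem.List.slice cs (some 2) (some 4)

-- cell[:4] != "0000"
def pvNZ (cell : String) : Bool := PySem.List.slice cell.toList none (some 4) != "0000".toList

-- f"{n:02}"  (n here is always a nonnegative count)
def pvFmt2 (n : Int) : List Char :=
  if 0 ≤ n ∧ n < 10 then '0' :: PySem.Int.toChars n else PySem.Int.toChars n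

-- board[y][x] = cell[:5] + f"{n:02}"  (shared write-back step; the branch guarding it differs per port)
def pvWrite (b : List (List String)) (y x : Int) (row : List String) (cell : List Char) (n : Int) :
    List (List String) :=
  b.set y.toNat (row.set x.toNat (String.ofList (PySem.List.slice cell none (some 5) ++ pvFmt2 n)))

def count_contiguous_items (board : List (List String)) : List (List String) :=
  -- unique_clusters = set(cell[0]+cell[2:4] for row in board for cell in row if cell[:4] != "0000")
  let uniq : PySem.Set (List Char) :=
    PySem.Set.ofList ((board.flatten.filter pvNZ).map (fun cell => pvCodeL cell.toList))
  -- cluster_counts = {cluster: 0 for cluster in unique_clusters}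
  let counts0 : PySem.Dict (List Char) Int :=
    uniq.foldl (fun d c => d.insert c 0) PySem.Dict.empty
  -- counting pass: if cluster_code in cluster_counts: cluster_counts[cluster_code] += 1
  let counts : PySem.Dict (List Char) Int :=
    board.foldl (fun d row => row.foldl (fun d cell =>
      let code := pvCodeL cell.toList
      if d.contains code then d.insert code (d.getD code 0 + 1) else d) d) counts0
  -- write-back: for y in range(len(board)): for x in range(len(board[0])): …
  (PySem.List.pyRange 0 board.length 1).foldl (fun b y =>
    (PySem.List.pyRange 0 (((PySem.List.pyGet? b 0).getD []).length) 1).foldl (fun b x =>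
      let row := (PySem.List.pyGet? b y).getD []
      let cell := ((PySem.List.pyGet? row x).getD "").toList
      let code := pvCodeL cell
      match counts.get? code with
      | some n => pvWrite b y x row cell n
      | none => b) b) board

-- ===== PORT B =====
-- one step of Source B's run-length scan: state = (table, cur) with cur = None | (code, run_length, run_has_valid_cell)
def pvStep (p : PySem.Dict (List Char) Int × Option (List Char × Int × Bool))
    (q : List Char × Bool) :
    PySem.Dict (List Char) Int × Option (List Char × Int × Bool) :=
  match p.2 with
  | some (c, n, s) =>
    if c = q.1 then (p.1, some (c, n + 1, s || q.2))
    else ((if s then p.1.insert c n else p.1), some (q.1, 1, q.2))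
  | none => (p.1, some (q.1, 1, q.2))

-- final flush: if cur is not None and cur[2]: table[cur[0]] = cur[1]
def pvFlush (p : PySem.Dict (List Char) Int × Option (List Char × Int × Bool)) :
    PySem.Dict (List Char) Int :=
  match p.2 with
  | some (c, n, s) => if s then p.1.insert c n else p.1
  | none => p.1

def count_contiguous_items_alt (board : List (List String)) : List (List String) :=
  -- pairs = sorted(((cell[0]+cell[2:4], cell[:4] != "0000") for row in board for cell in row), key=lambda p: p[0])
  let pairs : List (List Char × Bool) :=
    PySem.List.sorted (board.flatten.map (fun cell => (pvCodeL cell.toList, pvNZ cell)))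
      (fun p => p.1) false
  -- run-length scan over the sorted pairs
  let table : PySem.Dict (List Char) Int :=
    pvFlush (pairs.foldl pvStep (PySem.Dict.empty, none))
  -- write-back: rewrite a cell only when its code is in the table
  (PySem.List.pyRange 0 board.length 1).foldl (fun b y =>
    (PySem.List.pyRange 0 (((PySem.List.pyGet? b 0).getD []).length) 1).foldl (fun b x =>
      let row := (PySem.List.pyGet? b y).getD []
      let cell := ((PySem.List.pyGet? row x).getD "").toList
      let code := pvCodeL cell
      if table.contains code then
        pvWrite b y x row cell (table.getD code 0)
      else b) b) board

-- ===== PRECONDITION & SPEC =====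
-- Pre_ excludes exactly the inputs on which A raises IndexError: a board containing an empty-string
-- cell (cell[0]), or a row shorter than row 0 (board[y][x] with x < len(board[0])).
def Pre_count_contiguous_items (board : List (List String)) : Prop :=
  (∀ row ∈ board, ∀ cell ∈ row, cell ≠ "") ∧ (∀ row ∈ board, (board.headD []).length ≤ row.length)
instance (board : List (List String)) : Decidable (Pre_count_contiguous_items board) := by
  unfold Pre_count_contiguous_items; infer_instance

def pvWitness_count_contiguous_items : List (List String) :=
  [["1a234", "0000"], ["1b234", "20345"]]

def Spec_count_contiguous_items (board : List (List String)) (out : List (List String)) : Prop :=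
  out = count_contiguous_items_alt board
instance (board : List (List String)) (out : List (List String)) :
    Decidable (Spec_count_contiguous_items board out) := by
  unfold Spec_count_contiguous_items; infer_instance

-- ===== CLAIM (what is proved, stated in full; the proofs are below) =====
def Claim_equal_count_contiguous_items : Prop :=
  ∀ (board : List (List String)), Dom_count_contiguous_items board →
    Pre_count_contiguous_items board →
    Spec_count_contiguous_items board (count_contiguous_items board)

-- ===== LEMMAS AND PROOFS =====

-- dict {c: 0 for c in L}: lookup
theorem pv_get?_foldl_insert_zero (L : List (List Char)) (d : PySem.Dict (List Char) Int)
    (k : List Char) :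
    (L.foldl (fun d c => d.insert c (0 : Int)) d).get? k
      = if k ∈ L then some 0 else d.get? k := by
  induction L generalizing d with
  | nil => simp
  | cons c L ih =>
    simp only [List.foldl_cons, ih, List.mem_cons]
    rw [PySem.Dict.get?_insert]
    by_cases h : k ∈ L
    · simp [h]
    · by_cases hk : k = c <;> simp [h, hk]

-- A's counting pass: keys are unchanged …
theorem pv_countA_contains (L : List (List Char)) (d : PySem.Dict (List Char) Int) (k : List Char) :
    (L.foldl (fun d code => if d.contains code then d.insert code (d.getD code 0 + 1) else d) d).contains k
      = d.contains k := by
  induction L generalizing d with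
  | nil => rfl
  | cons c L ih =>
    simp only [List.foldl_cons]
    by_cases hc : d.contains c
    · rw [if_pos hc, ih, PySem.Dict.contains_insert]
      by_cases hk : k == c
      · simp_all [(by exact (beq_iff_eq).mp hk : k = c)]
      · simp [hk]
    · rw [if_neg hc, ih]

-- … and each present key gains the count of its occurrences
theorem pv_countA_getD (L : List (List Char)) (d : PySem.Dict (List Char) Int) (k : List Char)
    (hk : d.contains k = true) :
    (L.foldl (fun d code => if d.contains code then d.insert code (d.getD code 0 + 1) else d) d).getD k 0
      = d.getD k 0 + (L.count k : Int) := by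
  induction L generalizing d with
  | nil => simp
  | cons c L ih =>
    simp only [List.foldl_cons]
    by_cases hc : d.contains c
    · rw [if_pos hc]
      have hk' : (d.insert c (d.getD c 0 + 1)).contains k = true := by
        rw [PySem.Dict.contains_insert]; simp [hk]
      rw [ih _ hk', PySem.Dict.getD_insert]
      by_cases hkc : k = c
      · subst hkc; simp; omega
      · have hck : ¬ c = k := fun h => hkc h.symm
        have : (c :: L).count k = L.count k := by simp [hck]
        rw [if_neg hkc, this]
    · rw [if_neg hc, ih _ hk]
      have hck : ¬ c = k := fun h => hc (h ▸ hk)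
      have : (c :: L).count k = L.count k := by simp [hck]
      rw [this]

-- A's lookup: get? k = (count of k among all codes) iff k is a valid code, else none
theorem pv_key_fact (CL VL : List (List Char)) (k : List Char) :
    (CL.foldl (fun d code => if d.contains code then d.insert code (d.getD code 0 + 1) else d)
        ((PySem.Set.ofList VL).foldl (fun d c => d.insert c (0 : Int)) PySem.Dict.empty)).get? k
      = if k ∈ VL then some ((CL.count k : Int)) else none := by
  set d0 : PySem.Dict (List Char) Int :=
    (PySem.Set.ofList VL).foldl (fun d c => d.insert c (0 : Int)) PySem.Dict.empty with hd0
  set dA : PySem.Dict (List Char) Int :=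
    CL.foldl (fun d code => if d.contains code then d.insert code (d.getD code 0 + 1) else d) d0 with hdA
  have hmem : k ∈ (PySem.Set.ofList VL : List (List Char)) ↔ k ∈ VL := PySem.Set.mem_ofList VL k
  have h0 : d0.get? k = if k ∈ (PySem.Set.ofList VL : List (List Char)) then some 0 else none := by
    rw [hd0, pv_get?_foldl_insert_zero]
    split_ifs <;> simp
  by_cases hm : k ∈ (PySem.Set.ofList VL : List (List Char))
  · have hc0 : d0.contains k = true := by
      rw [PySem.Dict.contains_eq_isSome_get?, h0, if_pos hm]; rfl
    have hcont : dA.contains k = true := by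
      rw [hdA, pv_countA_contains]; exact hc0
    have hgd := pv_countA_getD CL d0 k hc0
    have hg0 : d0.getD k 0 = 0 := by
      rw [PySem.Dict.getD_eq_get?_getD, h0, if_pos hm]; rfl
    rw [hg0, zero_add, ← hdA] at hgd
    have hsome : (dA.get? k).isSome = true := by
      rw [← PySem.Dict.contains_eq_isSome_get?]; exact hcont
    obtain ⟨v, hv⟩ := Option.isSome_iff_exists.mp hsome
    have hveq : v = (CL.count k : Int) := by
      have := PySem.Dict.getD_of_get?_eq_some dA (0 : Int) hv
      rw [this] at hgd; exact hgd
    rw [hv, hveq, if_pos (hmem.mp hm)]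
  · have hc0 : d0.contains k = false := by
      rw [PySem.Dict.contains_eq_isSome_get?, h0, if_neg hm]; rfl
    have hnone : dA.get? k = none := by
      rw [PySem.Dict.get?_eq_none_iff_contains, hdA, pv_countA_contains]; exact hc0
    rw [hnone, if_neg (fun h => hm (hmem.mpr h))]

-- B's run-length scan from a live run (c, n, s): the grouping invariant
theorem pv_beq_false {a b : List Char} (h : a ≠ b) : (a == b) = false := by
  simp [h]

theorem pv_run (P : List (List Char × Bool)) (d : PySem.Dict (List Char) Int)
    (c : List Char) (n : Int) (s : Bool) (k : List Char)
    (hP : P.Pairwise (fun a b => a.1 ≤ b.1))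
    (hc : ∀ p ∈ P, c ≤ p.1) :
    (pvFlush (P.foldl pvStep (d, some (c, n, s)))).get? k
      = if k = c then
          (if (s || P.any (fun p => p.1 == c && p.2)) = true
            then some (n + (P.countP (fun p => p.1 == c) : Int)) else d.get? c)
        else
          (if P.any (fun p => p.1 == k && p.2) = true
            then some ((P.countP (fun p => p.1 == k) : Int)) else d.get? k) := by
  induction P generalizing d c n s with
  | nil =>
    simp only [List.foldl_nil, pvFlush, List.any_nil, List.countP_nil, Bool.or_false,
      Nat.cast_zero, add_zero]
    by_cases hk : k = c <;> cases s <;>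
      simp [hk, PySem.Dict.get?_insert]
  | cons q T ih =>
    obtain ⟨a, b⟩ := q
    have hT : T.Pairwise (fun x y => x.1 ≤ y.1) := hP.of_cons
    have hhead : ∀ p ∈ T, a ≤ p.1 := fun p hp => (List.pairwise_cons.mp hP).1 p hp
    by_cases hca : c = a
    · -- run continues
      have hstep : pvStep (d, some (c, n, s)) (a, b) = (d, some (c, n + 1, s || b)) := by
        simp [pvStep, hca]
      rw [List.foldl_cons, hstep, ih d c (n + 1) (s || b) hT (fun p hp => hca ▸ hhead p hp)]
      by_cases hk : k = c
      · subst hk; subst hca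
        simp only [List.any_cons, List.countP_cons, beq_self_eq_true, Bool.true_and, if_true,
          Bool.or_assoc]
        split_ifs with h
        · congr 1; push_cast; ring
        · rfl
      · have hak : (a == k) = false := pv_beq_false (hca ▸ fun h => hk h.symm)
        simp [if_neg hk, List.any_cons, List.countP_cons, hak]
    · -- run flushes, new run starts with key a
      have hlt : c < a := lt_of_le_of_ne (hc (a, b) List.mem_cons_self) hca
      have hstep : pvStep (d, some (c, n, s)) (a, b)
          = ((if s then d.insert c n else d), some (a, 1, b)) := by
        simp [pvStep, hca]
      have hTnec : ∀ p ∈ T, p.1 ≠ c := fun p hp => (lt_of_lt_of_le hlt (hhead p hp)).ne'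
      rw [List.foldl_cons, hstep, ih _ a 1 b hT hhead]
      by_cases hka : k = a
      · subst hka
        have hkc : k ≠ c := fun h => hca h.symm
        rw [if_neg hkc, if_pos rfl]
        have hcns : (((k, b) :: T).any fun p => p.1 == k && p.2)
            = (b || T.any fun p => p.1 == k && p.2) := by simp
        rw [hcns]
        cases hT2 : (b || T.any fun p => p.1 == k && p.2)
        · cases s <;> simp [PySem.Dict.get?_insert, hkc]
        · simp only [if_true, List.countP_cons, beq_self_eq_true]
          congr 1
          push_cast
          ring
      · by_cases hkc : k = c
        · subst hkc
          have hak : (a == k) = false := pv_beq_false (fun h => hka h.symm)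
          have hTany : (T.any fun p => p.1 == k && p.2) = false := by
            rw [List.any_eq_false]; intro p hp; simp [pv_beq_false (hTnec p hp)]
          have hTcnt : (T.countP fun p => p.1 == k) = 0 := by
            rw [List.countP_eq_zero]; intro p hp; simp [pv_beq_false (hTnec p hp)]
          cases s <;> simp [hka, hTany, hTcnt, hak]
        · have hak : (a == k) = false := pv_beq_false (fun h => hka h.symm)
          cases hT2 : (T.any fun p => p.1 == k && p.2) <;>
            cases s <;> simp [hka, hkc, hak, hT2, PySem.Dict.get?_insert]

-- B's table over the sorted pairs, characterised against the UNSORTED pair list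
theorem pv_table (Q : List (List Char × Bool)) (k : List Char) :
    (pvFlush ((PySem.List.sorted Q (fun p => p.1) false).foldl pvStep
        (PySem.Dict.empty, none))).get? k
      = if Q.any (fun p => p.1 == k && p.2) = true
          then some ((Q.countP (fun p => p.1 == k) : Int)) else none := by
  have hsEq : (PySem.List.sorted Q (fun p => p.1) false)
      = @PySem.List.sorted _ _ List.instLinearOrder.toLT LinearOrder.toDecidableLT Q
          (fun p => p.1) false := by
    congr 1
  have hperm : (PySem.List.sorted Q (fun p => p.1) false).Perm Q :=
    PySem.List.sorted_perm Q (fun p => p.1) false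
  have hpair : (PySem.List.sorted Q (fun p => p.1) false).Pairwise (fun a b => a.1 ≤ b.1) := by
    rw [hsEq]; exact PySem.List.sorted_pairwise Q (fun p => p.1)
  rw [← hperm.any_eq, ← hperm.countP_eq]
  cases hP : PySem.List.sorted Q (fun p => p.1) false with
  | nil => simp [pvFlush]
  | cons q T =>
    obtain ⟨q1, q2⟩ := q
    rw [hP] at hpair
    have hT : T.Pairwise (fun a b => a.1 ≤ b.1) := hpair.of_cons
    have hhead : ∀ p ∈ T, q1 ≤ p.1 := fun p hp => (List.pairwise_cons.mp hpair).1 p hp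
    have hstep : pvStep (PySem.Dict.empty, none) (q1, q2)
        = ((PySem.Dict.empty : PySem.Dict (List Char) Int), some (q1, 1, q2)) := by
      simp [pvStep]
    rw [List.foldl_cons, hstep, pv_run T PySem.Dict.empty q1 1 q2 k hT hhead]
    by_cases hk : k = q1
    · subst hk
      rw [if_pos rfl]
      have hcns : (((k, q2) :: T).any fun p => p.1 == k && p.2)
          = (q2 || T.any fun p => p.1 == k && p.2) := by simp
      rw [hcns]
      cases hT2 : (q2 || T.any fun p => p.1 == k && p.2)
      · simp [PySem.Dict.get?_empty]
      · simp only [if_true, List.countP_cons, beq_self_eq_true]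
        congr 1
        push_cast
        ring
    · have hq1k : (q1 == k) = false := pv_beq_false (fun h => hk h.symm)
      cases hT2 : (T.any fun p => p.1 == k && p.2) <;>
        simp [hk, hq1k, hT2, PySem.Dict.get?_empty]

-- the two write-back loops agree whenever the two lookups agree pointwise
theorem pv_update_eq (board : List (List String))
    (countsA table : PySem.Dict (List Char) Int)
    (h : ∀ k, countsA.get? k = table.get? k) :
    (PySem.List.pyRange 0 board.length 1).foldl (fun b y =>
      (PySem.List.pyRange 0 (((PySem.List.pyGet? b 0).getD []).length) 1).foldl (fun b x =>
        let row := (PySem.List.pyGet? b y).getD []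
        let cell := ((PySem.List.pyGet? row x).getD "").toList
        let code := pvCodeL cell
        match countsA.get? code with
        | some n => pvWrite b y x row cell n
        | none => b) b) board
  = (PySem.List.pyRange 0 board.length 1).foldl (fun b y =>
      (PySem.List.pyRange 0 (((PySem.List.pyGet? b 0).getD []).length) 1).foldl (fun b x =>
        let row := (PySem.List.pyGet? b y).getD []
        let cell := ((PySem.List.pyGet? row x).getD "").toList
        let code := pvCodeL cell
        if table.contains code then
          pvWrite b y x row cell (table.getD code 0)
        else b) b) board := by
  have hstep : (fun (b : List (List String)) (y : Int) =>
      (PySem.List.pyRange 0 (((PySem.List.pyGet? b 0).getD []).length) 1).foldl (fun b x =>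
        let row := (PySem.List.pyGet? b y).getD []
        let cell := ((PySem.List.pyGet? row x).getD "").toList
        let code := pvCodeL cell
        match countsA.get? code with
        | some n => pvWrite b y x row cell n
        | none => b) b)
    = (fun (b : List (List String)) (y : Int) =>
      (PySem.List.pyRange 0 (((PySem.List.pyGet? b 0).getD []).length) 1).foldl (fun b x =>
        let row := (PySem.List.pyGet? b y).getD []
        let cell := ((PySem.List.pyGet? row x).getD "").toList
        let code := pvCodeL cell
        if table.contains code then
          pvWrite b y x row cell (table.getD code 0)
        else b) b) := by
    funext b y
    have hinner : (fun (b : List (List String)) (x : Int) =>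
        let row := (PySem.List.pyGet? b y).getD []
        let cell := ((PySem.List.pyGet? row x).getD "").toList
        let code := pvCodeL cell
        match countsA.get? code with
        | some n => pvWrite b y x row cell n
        | none => b)
      = (fun (b : List (List String)) (x : Int) =>
        let row := (PySem.List.pyGet? b y).getD []
        let cell := ((PySem.List.pyGet? row x).getD "").toList
        let code := pvCodeL cell
        if table.contains code then
          pvWrite b y x row cell (table.getD code 0)
        else b) := by
      funext b x
      simp only []
      cases hg : table.get? (pvCodeL (((PySem.List.pyGet? ((PySem.List.pyGet? b y).getD []) x).getD "").toList)) with
      | none =>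
        rw [h, hg]
        have : table.contains (pvCodeL (((PySem.List.pyGet? ((PySem.List.pyGet? b y).getD []) x).getD "").toList)) = false := by
          rw [PySem.Dict.contains_eq_isSome_get?, hg]; rfl
        rw [this]
        simp
      | some n =>
        rw [h, hg]
        have hcont : table.contains (pvCodeL (((PySem.List.pyGet? ((PySem.List.pyGet? b y).getD []) x).getD "").toList)) = true := by
          rw [PySem.Dict.contains_eq_isSome_get?, hg]; rfl
        have hgd : table.getD (pvCodeL (((PySem.List.pyGet? ((PySem.List.pyGet? b y).getD []) x).getD "").toList)) 0 = n :=
          PySem.Dict.getD_of_get?_eq_some table (0 : Int) hg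
        rw [hcont, hgd]
        simp
    rw [hinner]
  rw [hstep]

-- ===== VERDICT (by name: the statement is the Claim_ definition above) =====
theorem count_contiguous_items_spec : Claim_equal_count_contiguous_items := by
  intro board _ _
  unfold Spec_count_contiguous_items count_contiguous_items count_contiguous_items_alt
  simp only
  rw [← List.foldl_flatten (L := board)]
  apply pv_update_eq
  intro k
  have hA : board.flatten.foldl (fun d cell =>
        if d.contains (pvCodeL cell.toList)
        then d.insert (pvCodeL cell.toList) (d.getD (pvCodeL cell.toList) 0 + 1) else d)
        ((PySem.Set.ofList ((board.flatten.filter pvNZ).map (fun cell => pvCodeL cell.toList))).foldl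
          (fun d c => d.insert c (0 : Int)) PySem.Dict.empty)
      = (board.flatten.map (fun cell => pvCodeL cell.toList)).foldl (fun d code =>
        if d.contains code then d.insert code (d.getD code 0 + 1) else d)
        ((PySem.Set.ofList ((board.flatten.filter pvNZ).map (fun cell => pvCodeL cell.toList))).foldl
          (fun d c => d.insert c (0 : Int)) PySem.Dict.empty) := by
    rw [List.foldl_map]
  rw [hA, pv_key_fact, pv_table]
  -- both sides are the same canonical lookup
  have hmem : (k ∈ (board.flatten.filter pvNZ).map (fun cell => pvCodeL cell.toList))
      ↔ ((board.flatten.map (fun cell => (pvCodeL cell.toList, pvNZ cell))).any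
          (fun p => p.1 == k && p.2)) = true := by
    simp only [List.mem_map, List.mem_filter, List.any_map, List.any_eq_true, Function.comp]
    constructor
    · rintro ⟨cell, ⟨hc, hnz⟩, hcode⟩
      exact ⟨cell, hc, by simp [hcode, hnz]⟩
    · rintro ⟨cell, hc, hp⟩
      simp only [Bool.and_eq_true, beq_iff_eq] at hp
      exact ⟨cell, ⟨hc, hp.2⟩, hp.1⟩
  have hcnt : (board.flatten.map (fun cell => pvCodeL cell.toList)).count k
      = (board.flatten.map (fun cell => (pvCodeL cell.toList, pvNZ cell))).countP
          (fun p => p.1 == k) := by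
    rw [List.count_eq_countP, List.countP_map, List.countP_map]
    rfl
  by_cases hm : k ∈ (board.flatten.filter pvNZ).map (fun cell => pvCodeL cell.toList)
  · rw [if_pos hm, if_pos (hmem.mp hm), hcnt]
  · rw [if_neg hm, if_neg (fun h => hm (hmem.mpr h))]
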